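-- pv_equiv track=rewrite | github.com/cog-imperial/galini-dashboard | galini_dashboard/API/Symmetry.1.py | eliminateChildren
-- ===== SOURCE A (Python) =====
-- def eliminateChildren(nodes):
--     index = 0
--     while index < len(nodes):
--         index += 1
--         prev = nodes[:index]
--         # Removes all nodes that prefixes with nodes[index]
--         after = [x for x in nodes[index:] if not x.startswith(nodes[index - 1])]
--         if len(after) > 0:
--             prev += after
--         nodes = prev
--     return nodes
-- ===== SOURCE B (Python) =====
-- def eliminateChildren(nodes):
--     # Trie of kept strings: dict char -> child node; key None marks end-of-word.
--     root = {}
--     result = []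
--     for x in nodes:
--         node = root
--         covered = None in node
--         for ch in x:
--             if covered:
--                 break
--             node = node.get(ch)
--             if node is None:
--                 break
--             covered = None in node
--         if covered:
--             continue
--         result.append(x)
--         node = root
--         for ch in x:
--             node = node.setdefault(ch, {})
--         node[None] = True
--     return result
-- ===== Notes on version B (the rewrite author's own statement) =====
-- stated objective: faster
-- what changed: Replaces A's repeated rebuild-and-filter passes over the remaining list (startswith against each newly fixed element) with a single forward pass that keeps a trie of already-kept strings and decides each string by one root-to-leaf walk.
import Mathlib
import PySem

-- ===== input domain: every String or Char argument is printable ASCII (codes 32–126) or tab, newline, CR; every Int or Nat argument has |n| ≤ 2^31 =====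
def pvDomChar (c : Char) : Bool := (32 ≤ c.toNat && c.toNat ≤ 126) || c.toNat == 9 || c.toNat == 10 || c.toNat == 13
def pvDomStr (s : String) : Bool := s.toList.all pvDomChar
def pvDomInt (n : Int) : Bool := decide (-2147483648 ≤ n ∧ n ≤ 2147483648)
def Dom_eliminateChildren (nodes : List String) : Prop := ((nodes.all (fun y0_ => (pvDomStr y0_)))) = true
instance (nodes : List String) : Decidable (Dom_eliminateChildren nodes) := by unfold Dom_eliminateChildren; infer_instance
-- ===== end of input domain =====

-- B replaces A's quadratic repeated tail-filtering with a single kept-strings trie walked once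
-- per input string (faster, measured); return values agree on all inputs (A mutates only a local
-- variable, no caller-visible side effects).

-- ===== PORT A =====
-- the while loop of A: index advances by one, the list is rebuilt each iteration;
-- fuel only makes the recursion structural (nodes.length - index shrinks every step,
-- so fuel = initial nodes.length is enough; proved in pvLoop_eq_elimFrom below).
-- nodes[:index] / nodes[index:] have a nonnegative in-range index here, so take/drop is exact
def eliminateChildrenLoop : Nat → List String → Nat → List String
  | 0, nodes, _ => nodes
  | fuel + 1, nodes, index =>
    if h : index < nodes.length then
      let prev := nodes.take (index + 1)
      let after := (nodes.drop (index + 1)).filter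
        (fun x => !(PySem.Str.startswith x (nodes[index]'h)))
      eliminateChildrenLoop fuel (if after.length > 0 then prev ++ after else prev) (index + 1)
    else nodes

def eliminateChildren (nodes : List String) : List String :=
  eliminateChildrenLoop nodes.length nodes 0

-- ===== PORT B =====
-- trie children as a first-child/next-sibling chain (one entry = char, end-of-word flag of the
-- child, the child's own children, the remaining siblings); a trie node is (end flag, children).
-- This is the Python dict-of-dicts trie with its insertion-ordered entries laid out as a chain.
inductive PvNode where
  | nil : PvNode
  | cons : Char → Bool → PvNode → PvNode → PvNode
deriving DecidableEq, Repr

def pvFindChild : PvNode → Char → Option (Bool × PvNode)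
  | .nil, _ => none
  | .cons c e ch rest, d => if d = c then some (e, ch) else pvFindChild rest d

-- the lookup walk: covered as soon as we stand on an end-of-word node
def pvCovered : Bool × PvNode → List Char → Bool
  | (e, _), [] => e
  | (e, cs), ch :: rest =>
    if e then true else
      match pvFindChild cs ch with
      | none => false
      | some t => pvCovered t rest

-- setdefault: update the child entry at ch (appending an empty node if absent) with f
def pvSetChild : PvNode → Char → (Bool × PvNode → Bool × PvNode) → PvNode
  | .nil, ch, f => .cons ch (f (false, .nil)).1 (f (false, .nil)).2 .nil
  | .cons c e chld rest, ch, f =>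
    if ch = c then .cons c (f (e, chld)).1 (f (e, chld)).2 rest
    else .cons c e chld (pvSetChild rest ch f)

-- the insertion walk: setdefault each child, mark the final node end-of-word
def pvInsert : Bool × PvNode → List Char → Bool × PvNode
  | (_, cs), [] => (true, cs)
  | (e, cs), ch :: rest => (e, pvSetChild cs ch (fun t => pvInsert t rest))

def eliminateChildrenAltGo (result : List String) (root : Bool × PvNode) :
    List String → List String
  | [] => result
  | x :: rest =>
    if pvCovered root x.toList then eliminateChildrenAltGo result root rest
    else eliminateChildrenAltGo (result ++ [x]) (pvInsert root x.toList) rest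

def eliminateChildren_alt (nodes : List String) : List String :=
  eliminateChildrenAltGo [] (false, .nil) nodes

-- ===== PRECONDITION & SPEC =====
def Spec_eliminateChildren (nodes : List String) (out : List String) : Prop := out = eliminateChildren_alt nodes
instance (nodes : List String) (out : List String) : Decidable (Spec_eliminateChildren nodes out) := by unfold Spec_eliminateChildren; infer_instance

-- ===== CLAIM (what is proved, stated in full; the proofs are below) =====
def Claim_equal_eliminateChildren : Prop := ∀ (nodes : List String), Dom_eliminateChildren nodes → Spec_eliminateChildren nodes (eliminateChildren nodes)

-- ===== LEMMAS AND PROOFS =====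

-- abstract middle form: A's loop in done/todo shape
def pvElimFrom (done todo : List String) : List String :=
  match todo with
  | [] => done
  | h :: t => pvElimFrom (done ++ [h]) (t.filter (fun x => !(PySem.Str.startswith x h)))
termination_by todo.length
decreasing_by
  simp only [List.length_unattach, List.length_cons]
  exact Nat.lt_succ_of_le (le_trans (List.length_filter_le _ _) (by simp))

-- abstract form of B: keep x iff no kept string is a prefix of x
def pvKeptAny (kept : List String) (x : String) : Bool :=
  kept.any (fun k => PySem.Str.startswith x k)

def pvGo (kept : List String) : List String → List String
  | [] => kept
  | x :: t =>
    if pvKeptAny kept x then pvGo kept t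
    else pvGo (kept ++ [x]) t

theorem pvLoop_eq_elimFrom (n : Nat) : ∀ (todo : List String), todo.length ≤ n →
    ∀ (done : List String),
    eliminateChildrenLoop n (done ++ todo) done.length = pvElimFrom done todo := by
  induction n with
  | zero =>
    intro todo hn done
    have : todo = [] := List.eq_nil_of_length_eq_zero (Nat.le_zero.mp hn)
    subst this
    rw [eliminateChildrenLoop, pvElimFrom]
    simp
  | succ n IH =>
    intro todo hn done
    match todo with
    | [] =>
      rw [eliminateChildrenLoop, pvElimFrom]
      simp
    | h :: t =>
      rw [eliminateChildrenLoop, pvElimFrom]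
      have hlt : done.length < (done ++ h :: t).length := by simp
      rw [dif_pos hlt]
      have hget : (done ++ h :: t)[done.length]'hlt = h := by simp
      have htake : (done ++ h :: t).take (done.length + 1) = done ++ [h] := by
        rw [show done.length + 1 = done.length + 1 from rfl, List.take_append]
        simp
      have hdrop : (done ++ h :: t).drop (done.length + 1) = t := by
        rw [List.drop_append]
        simp
      rw [hget, htake, hdrop]
      set after := t.filter (fun x => !(PySem.Str.startswith x h)) with hafter
      have hkey : (if after.length > 0 then (done ++ [h]) ++ after else done ++ [h])
          = (done ++ [h]) ++ after := by
        split
        · rfl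
        · have : after = [] := by
            cases hc : after with
            | nil => rfl
            | cons a as => simp [hc] at *
          simp [this]
      show eliminateChildrenLoop n
          (if after.length > 0 then (done ++ [h]) ++ after else done ++ [h]) (done.length + 1)
          = pvElimFrom (done ++ [h]) after
      rw [hkey]
      have hlen : after.length ≤ n := by
        have : after.length ≤ t.length := List.length_filter_le _ _
        simp at hn; omega
      have := IH after hlen (done ++ [h])
      rw [← this]
      congr 1
      simp

-- pvGo skips anything a fixed kept string h is a prefix of
theorem pvGo_filter (todo : List String) : ∀ (kept : List String) (h : String),
    h ∈ kept → pvGo kept todo = pvGo kept (todo.filter (fun x => !(PySem.Str.startswith x h))) := by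
  induction todo with
  | nil => intro kept h _; rfl
  | cons x t IH =>
    intro kept h hmem
    cases hsw : PySem.Str.startswith x h with
    | true =>
      have hany : pvKeptAny kept x = true :=
        List.any_eq_true.mpr ⟨h, hmem, hsw⟩
      rw [List.filter_cons, if_neg (by rw [hsw]; simp)]
      rw [pvGo, if_pos hany]
      exact IH kept h hmem
    | false =>
      rw [List.filter_cons, if_pos (by rw [hsw]; rfl)]
      rw [pvGo, pvGo]
      split
      · exact IH kept h hmem
      · exact IH (kept ++ [x]) h (by simp [hmem])

theorem pvElimFrom_eq_go (n : Nat) : ∀ (todo : List String), todo.length ≤ n →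
    ∀ (done : List String),
    (∀ x ∈ todo, pvKeptAny done x = false) → pvElimFrom done todo = pvGo done todo := by
  induction n with
  | zero =>
    intro todo hn done _
    have : todo = [] := List.eq_nil_of_length_eq_zero (Nat.le_zero.mp hn)
    subst this; rw [pvElimFrom, pvGo]
  | succ n IH =>
    intro todo hn done hclean
    match todo with
    | [] => rw [pvElimFrom, pvGo]
    | h :: t =>
      rw [pvElimFrom, pvGo]
      have hh : pvKeptAny done h = false := hclean h (by simp)
      rw [if_neg (by simp [hh])]
      set after := t.filter (fun x => !(PySem.Str.startswith x h)) with hafter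
      have hlen : after.length ≤ n := by
        have : after.length ≤ t.length := List.length_filter_le _ _
        simp at hn; omega
      have hclean' : ∀ x ∈ after, pvKeptAny (done ++ [h]) x = false := by
        intro x hx
        rw [hafter, List.mem_filter] at hx
        obtain ⟨hxt, hxf⟩ := hx
        have h1 : pvKeptAny done x = false := hclean x (by simp [hxt])
        have h2 : PySem.Str.startswith x h = false := by
          cases hb : PySem.Str.startswith x h
          · rfl
          · exact absurd hxf (by rw [hb]; simp)
        unfold pvKeptAny at h1 ⊢
        rw [List.any_append]
        simp only [List.any_cons, List.any_nil, Bool.or_false]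
        rw [h1, h2]
        rfl
      rw [IH after hlen (done ++ [h]) hclean']
      rw [← pvGo_filter t (done ++ [h]) h (by simp)]

-- trie lemmas: pvCovered of an inserted trie
theorem pvFindChild_setChild_self (cs : PvNode) (c : Char) (f : Bool × PvNode → Bool × PvNode) :
    pvFindChild (pvSetChild cs c f) c = some (f ((pvFindChild cs c).getD (false, .nil))) := by
  induction cs with
  | nil => simp [pvSetChild, pvFindChild]
  | cons c' e ch rest IH1 IH2 =>
    by_cases h : c = c'
    · subst h; simp [pvSetChild, pvFindChild]
    · simp [pvSetChild, pvFindChild, h, IH2]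

theorem pvFindChild_setChild_ne (cs : PvNode) (c d : Char) (f : Bool × PvNode → Bool × PvNode)
    (hne : d ≠ c) : pvFindChild (pvSetChild cs c f) d = pvFindChild cs d := by
  induction cs with
  | nil => simp [pvSetChild, pvFindChild, hne]
  | cons c' e ch rest IH1 IH2 =>
    by_cases h : c = c'
    · subst h; simp [pvSetChild, pvFindChild, hne]
    · simp only [pvSetChild, if_neg h]
      by_cases h2 : d = c'
      · subst h2; simp [pvFindChild]
      · simp [pvFindChild, h2, IH2]

theorem pvCovered_empty (x : List Char) : pvCovered (false, .nil) x = false := by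
  cases x <;> simp [pvCovered, pvFindChild]

theorem pvCovered_insert (k : List Char) : ∀ (t : Bool × PvNode) (x : List Char),
    pvCovered (pvInsert t k) x = (k.isPrefixOf x || pvCovered t x) := by
  induction k with
  | nil =>
    intro ⟨e, cs⟩ x
    cases x <;> simp [pvInsert, pvCovered, List.isPrefixOf]
  | cons c k' IH =>
    intro ⟨e, cs⟩ x
    cases x with
    | nil => simp [pvInsert, pvCovered, List.isPrefixOf]
    | cons d x' =>
      by_cases he : e = true
      · simp [pvInsert, pvCovered, he]
      · have he' : e = false := by simpa using he
        subst he'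
        by_cases hd : d = c
        · subst hd
          simp only [pvInsert, pvCovered, List.isPrefixOf, Bool.false_eq_true, if_false,
            pvFindChild_setChild_self, IH, beq_self_eq_true, Bool.true_and]
          cases hfc : pvFindChild cs d with
          | none => simp [pvCovered_empty]
          | some ct => rfl
        · simp only [pvInsert, pvCovered, List.isPrefixOf, Bool.false_eq_true, if_false,
            pvFindChild_setChild_ne cs c d _ hd]
          have hb : (c == d) = false := by
            simp only [beq_eq_false_iff_ne, ne_eq]
            exact fun hcontra => hd hcontra.symm
          simp only [hb, Bool.false_and, Bool.false_or]

-- B's fold equals pvGo, via the invariant "trie = trie of kept"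
theorem pvAltGo_eq_go (todo : List String) : ∀ (kept : List String) (root : Bool × PvNode),
    (∀ x : List Char, pvCovered root x = (kept.any (fun k => k.toList.isPrefixOf x))) →
    eliminateChildrenAltGo kept root todo = pvGo kept todo := by
  induction todo with
  | nil => intro kept root _; rfl
  | cons x t IH =>
    intro kept root hinv
    rw [eliminateChildrenAltGo, pvGo]
    have hpt : ∀ k : String, k.toList.isPrefixOf x.toList = PySem.Str.startswith x k := by
      intro k
      rw [PySem.Str.startswith_eq, Bool.eq_iff_iff, List.isPrefixOf_iff_prefix,
        PySem.Chars.startswith_iff]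
    have hcov : pvCovered root x.toList = pvKeptAny kept x := by
      rw [hinv]
      unfold pvKeptAny
      simp only [hpt]
    rw [hcov]
    split
    · exact IH kept root hinv
    · apply IH
      intro y
      rw [pvCovered_insert, hinv]
      simp [Bool.or_comm]

theorem pvKeptAny_nil (x : String) : pvKeptAny [] x = false := rfl

-- ===== VERDICT (by name: the statement is the Claim_ definition above) =====
theorem eliminateChildren_spec : Claim_equal_eliminateChildren := by
  intro nodes _
  unfold Spec_eliminateChildren eliminateChildren eliminateChildren_alt
  have h1 := pvLoop_eq_elimFrom nodes.length nodes le_rfl []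
  simp only [List.nil_append, List.length_nil] at h1
  rw [h1]
  rw [pvElimFrom_eq_go nodes.length nodes le_rfl [] (fun x _ => pvKeptAny_nil x)]
  rw [pvAltGo_eq_go nodes [] (false, .nil) (fun x => by simp [pvCovered_empty])]
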